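-- pv_equiv track=rewrite | github.com/hkommineni/Crypto | hex2Base64.py | hex_base64
-- ===== SOURCE A (Python) =====
-- def hex_base64(s, padding = False):
--     ascii_letters = "ABCDEFGHIJKLMNOPQRSTUVWXYZabcdefghijklmnopqrstuvwxyz0123456789+/"
--     b64_value = "="
--     return_value = ""
--     left = 0
--     for i in range(0, len(s)):
--         if left == 0:
--             return_value += ascii_letters[ord(s[i]) >> 2]
--             left = 2
--         else:
--             if left == 6:
--                 return_value += ascii_letters[ord(s[i - 1]) & 63]
--                 return_value += ascii_letters[ord(s[i]) >> 2]
--                 left = 2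
--             else:
--                 index1 = ord(s[i - 1]) & (2 ** left - 1)
--                 index2 = ord(s[i]) >> (left + 2)
--                 index = (index1 << (6 - left)) | index2
--                 return_value += ascii_letters[index]
--                 left += 2
--     if left != 0:
--         return_value += ascii_letters[(ord(s[len(s) - 1]) & (2 ** left - 1)) << (6 - left)]
--     if(padding):
--         for i in range(0, (4 - len(return_value) % 4) % 4):
--             return_value += b64_value
--     return return_value
-- ===== SOURCE B (Python) =====
-- def hex_base64(s, padding = False):
--     ascii_letters = "ABCDEFGHIJKLMNOPQRSTUVWXYZabcdefghijklmnopqrstuvwxyz0123456789+/"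
--     out = []
--     n = len(s)
--     for i in range(0, n, 3):
--         b0 = ord(s[i])
--         out.append(ascii_letters[b0 >> 2])
--         if i + 1 < n:
--             b1 = ord(s[i + 1])
--             out.append(ascii_letters[((b0 & 3) << 4) | (b1 >> 4)])
--             if i + 2 < n:
--                 b2 = ord(s[i + 2])
--                 out.append(ascii_letters[((b1 & 15) << 2) | (b2 >> 6)])
--                 out.append(ascii_letters[b2 & 63])
--             else:
--                 out.append(ascii_letters[(b1 & 15) << 2])
--         else:
--             out.append(ascii_letters[(b0 & 3) << 4])
--     r = "".join(out)
--     if padding: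
--         r += "=" * ((4 - len(r) % 4) % 4)
--     return r
-- ===== Notes on version B (the rewrite author's own statement) =====
-- stated objective: alternative
-- what changed: Replaced A's per-character state machine (a 'left' bit-counter carried across iterations, reading back s[i-1], and a final leftover-bit flush) with the classic base64 encoder that walks the string in 3-byte groups and emits 2/3/4 output characters per group directly.
import Mathlib
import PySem

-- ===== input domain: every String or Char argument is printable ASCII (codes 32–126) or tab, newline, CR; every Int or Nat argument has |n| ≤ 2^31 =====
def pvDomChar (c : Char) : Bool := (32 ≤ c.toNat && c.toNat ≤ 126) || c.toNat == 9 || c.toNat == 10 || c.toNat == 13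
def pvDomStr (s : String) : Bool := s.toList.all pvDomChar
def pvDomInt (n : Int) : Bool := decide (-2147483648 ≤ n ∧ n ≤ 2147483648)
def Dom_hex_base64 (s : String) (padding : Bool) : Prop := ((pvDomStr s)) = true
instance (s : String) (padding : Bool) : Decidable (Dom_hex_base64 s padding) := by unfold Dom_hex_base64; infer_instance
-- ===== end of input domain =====

-- B replaces A's per-character 'left' state machine (which reads back s[i-1] and flushes leftover
-- bits at the end) with the classic 3-byte-group base64 encoder; same O(n) cost, different decomposition.

-- ===== PORT A =====
-- the base64 alphabet constant both Pythons spell out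
-- the 64-char alphabet string, as its char list (kernel-friendly form of "ABC…+/".toList)
def pvLetters : List Char :=
  ['A', 'B', 'C', 'D', 'E', 'F', 'G', 'H', 'I', 'J', 'K', 'L', 'M', 'N', 'O', 'P', 'Q', 'R', 'S', 'T', 'U', 'V', 'W', 'X', 'Y', 'Z', 'a', 'b', 'c', 'd', 'e', 'f', 'g', 'h', 'i', 'j', 'k', 'l', 'm', 'n', 'o', 'p', 'q', 'r', 's', 't', 'u', 'v', 'w', 'x', 'y', 'z', '0', '1', '2', '3', '4', '5', '6', '7', '8', '9', '+', '/']

-- one iteration of A's loop body; ord values and alphabet indices are char codes (Nat),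
-- always in range on Dom (codes ≤ 126), so the total pyGetD/getD access forms are exact here
def pvStepA (l : List Char) (st : List Char × Nat) (i : Int) : List Char × Nat :=
  let rv := st.1
  let left := st.2
  if left = 0 then
    (rv ++ [pvLetters.getD ((PySem.List.pyGetD l i ' ').toNat >>> 2) ' '], 2)
  else if left = 6 then
    (rv ++ [pvLetters.getD ((PySem.List.pyGetD l (i - 1) ' ').toNat &&& 63) ' ',
            pvLetters.getD ((PySem.List.pyGetD l i ' ').toNat >>> 2) ' '], 2)
  else
    let index1 := (PySem.List.pyGetD l (i - 1) ' ').toNat &&& (2 ^ left - 1)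
    let index2 := (PySem.List.pyGetD l i ' ').toNat >>> (left + 2)
    (rv ++ [pvLetters.getD ((index1 <<< (6 - left)) ||| index2) ' '], left + 2)

def hex_base64 (s : String) (padding : Bool) : String :=
  let l := s.toList
  let res := (PySem.List.pyRange 0 (PySem.List.len l) 1).foldl (pvStepA l) ([], 0)
  let rv := res.1
  let left := res.2
  let rv2 := if left ≠ 0 then
      rv ++ [pvLetters.getD (((PySem.List.pyGetD l (PySem.List.len l - 1) ' ').toNat &&& (2 ^ left - 1)) <<< (6 - left)) ' ']
    else rv
  let rv3 := if padding then
      (PySem.List.pyRange 0 (PySem.Int.mod (4 - PySem.Int.mod (PySem.List.len rv2) 4) 4) 1).foldl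
        (fun acc _ => acc ++ ['=']) rv2
    else rv2
  String.ofList rv3

-- ===== PORT B =====
-- B's 3-byte grouping loop, as the obvious structural recursion over the char list
def pvEnc : List Char → List Char
  | [] => []
  | [b0] =>
      [pvLetters.getD (b0.toNat >>> 2) ' ',
       pvLetters.getD ((b0.toNat &&& 3) <<< 4) ' ']
  | [b0, b1] =>
      [pvLetters.getD (b0.toNat >>> 2) ' ',
       pvLetters.getD (((b0.toNat &&& 3) <<< 4) ||| (b1.toNat >>> 4)) ' ',
       pvLetters.getD ((b1.toNat &&& 15) <<< 2) ' ']
  | b0 :: b1 :: b2 :: rest =>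
      [pvLetters.getD (b0.toNat >>> 2) ' ',
       pvLetters.getD (((b0.toNat &&& 3) <<< 4) ||| (b1.toNat >>> 4)) ' ',
       pvLetters.getD (((b1.toNat &&& 15) <<< 2) ||| (b2.toNat >>> 6)) ' ',
       pvLetters.getD (b2.toNat &&& 63) ' '] ++ pvEnc rest

def hex_base64_alt (s : String) (padding : Bool) : String :=
  let r := pvEnc s.toList
  let r2 := if padding then
      r ++ List.replicate (PySem.Int.mod (4 - PySem.Int.mod (PySem.List.len r) 4) 4).toNat '='
    else r
  String.ofList r2

-- ===== PRECONDITION & SPEC =====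
def Spec_hex_base64 (s : String) (padding : Bool) (out : String) : Prop := out = hex_base64_alt s padding
instance (s : String) (padding : Bool) (out : String) : Decidable (Spec_hex_base64 s padding out) := by unfold Spec_hex_base64; infer_instance

-- ===== CLAIM (what is proved, stated in full; the proofs are below) =====
def Claim_equal_hex_base64 : Prop := ∀ (s : String) (padding : Bool), Dom_hex_base64 s padding → Spec_hex_base64 s padding (hex_base64 s padding)

-- ===== LEMMAS AND PROOFS =====

-- A's loop re-expressed as a structural recursion: remaining chars, previous char, 'left', accumulator
def pvRunA : List Char → Char → Nat → List Char → List Char × Nat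
  | [], _, left, acc => (acc, left)
  | c :: cs, prev, left, acc =>
    if left = 0 then
      pvRunA cs c 2 (acc ++ [pvLetters.getD (c.toNat >>> 2) ' '])
    else if left = 6 then
      pvRunA cs c 2 (acc ++ [pvLetters.getD (prev.toNat &&& 63) ' ',
                             pvLetters.getD (c.toNat >>> 2) ' '])
    else
      pvRunA cs c (left + 2)
        (acc ++ [pvLetters.getD (((prev.toNat &&& (2 ^ left - 1)) <<< (6 - left)) ||| (c.toNat >>> (left + 2))) ' '])

-- A's run-from-left=2 followed by the final leftover-bit flush
def pvFinish (cs : List Char) (p : Char) (acc : List Char) : List Char :=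
  let st := pvRunA cs p 2 acc
  st.1 ++ [pvLetters.getD ((((p :: cs).getLast?.getD ' ').toNat &&& (2 ^ st.2 - 1)) <<< (6 - st.2)) ' ']

-- what B emits after the first output char, given pending byte p and the remaining bytes
def pvTail : Char → List Char → List Char
  | p, [] => [pvLetters.getD ((p.toNat &&& 3) <<< 4) ' ']
  | p, [b1] =>
      [pvLetters.getD (((p.toNat &&& 3) <<< 4) ||| (b1.toNat >>> 4)) ' ',
       pvLetters.getD ((b1.toNat &&& 15) <<< 2) ' ']
  | p, [b1, b2] =>
      [pvLetters.getD (((p.toNat &&& 3) <<< 4) ||| (b1.toNat >>> 4)) ' ',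
       pvLetters.getD (((b1.toNat &&& 15) <<< 2) ||| (b2.toNat >>> 6)) ' ',
       pvLetters.getD (b2.toNat &&& 63) ' ']
  | p, b1 :: b2 :: b3 :: rest =>
      [pvLetters.getD (((p.toNat &&& 3) <<< 4) ||| (b1.toNat >>> 4)) ' ',
       pvLetters.getD (((b1.toNat &&& 15) <<< 2) ||| (b2.toNat >>> 6)) ' ',
       pvLetters.getD (b2.toNat &&& 63) ' ',
       pvLetters.getD (b3.toNat >>> 2) ' '] ++ pvTail b3 rest

-- B's encoder decomposed as first output char plus pvTail
theorem pvEnc_cons : ∀ (p : Char) (cs : List Char),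
    pvEnc (p :: cs) = pvLetters.getD (p.toNat >>> 2) ' ' :: pvTail p cs := by
  intro p cs
  induction p, cs using pvTail.induct with
  | case1 p => simp [pvEnc, pvTail]
  | case2 p b1 => simp [pvEnc, pvTail]
  | case3 p b1 b2 => simp [pvEnc, pvTail]
  | case4 p b1 b2 b3 rest ih => simp [pvEnc, pvTail, ih]

-- pvRunA never returns to left = 0, so A's final flush always fires on nonempty input
theorem pvRunA_left_ne_zero : ∀ (cs : List Char) (p : Char) (left : Nat) (acc : List Char),
    left ≠ 0 → (pvRunA cs p left acc).2 ≠ 0 := by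
  intro cs
  induction cs with
  | nil => intro p left acc h; simpa [pvRunA] using h
  | cons c cs ih =>
      intro p left acc h
      by_cases h6 : left = 6
      · simp only [pvRunA, h6]
        exact ih c 2 _ (by omega)
      · simp only [pvRunA, if_neg h, if_neg h6]
        exact ih c (left + 2) _ (by omega)

-- A's run-then-flush produces exactly B's tail (three-at-a-time functional induction)
theorem pvFinish_eq_tail : ∀ (cs : List Char) (p : Char) (acc : List Char),
    pvFinish cs p acc = acc ++ pvTail p cs := by
  intro cs p acc
  induction p, cs using pvTail.induct generalizing acc with
  | case1 p => simp [pvFinish, pvRunA, pvTail]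
  | case2 p b1 => simp [pvFinish, pvRunA, pvTail]
  | case3 p b1 b2 => simp [pvFinish, pvRunA, pvTail]
  | case4 p b1 b2 b3 rest ih =>
      have h := ih (acc := acc ++ [pvLetters.getD (((p.toNat &&& 3) <<< 4) ||| (b1.toNat >>> 4)) ' ',
        pvLetters.getD (((b1.toNat &&& 15) <<< 2) ||| (b2.toNat >>> 6)) ' ',
        pvLetters.getD (b2.toNat &&& 63) ' ', pvLetters.getD (b3.toNat >>> 2) ' '])
      simp only [pvFinish, pvRunA, pvTail] at h ⊢
      norm_num at h ⊢
      simpa using h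

-- s[i-1] is the last char of the processed prefix
theorem pvGetD_prev (pre : List Char) (c prev : Char) (cs : List Char)
    (h : pre.getLast? = some prev) :
    PySem.List.pyGetD (pre ++ c :: cs) ((pre.length : Int) - 1) ' ' = prev := by
  have hne : pre ≠ [] := by rintro rfl; simp at h
  have hlen : 0 < pre.length := List.length_pos_iff.mpr hne
  have hcast : ((pre.length : Int) - 1) = ((pre.length - 1 : Nat) : Int) := by omega
  rw [hcast, PySem.List.pyGetD_natCast]
  have hlt : pre.length - 1 < pre.length := by omega
  rw [List.getLast?_eq_getElem?] at h
  simp [List.getD, List.getElem?_append_left hlt, h]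

-- A's index fold over the tail of the string equals the structural recursion pvRunA
theorem pvBridgeA : ∀ (cs pre acc : List Char) (left : Nat) (prev : Char),
    (left ≠ 0 → pre.getLast? = some prev) →
    (PySem.List.pyRange (pre.length : Int) ((pre.length : Int) + (cs.length : Int)) 1).foldl
        (pvStepA (pre ++ cs)) (acc, left)
      = pvRunA cs prev left acc := by
  intro cs
  induction cs with
  | nil =>
      intro pre acc left prev _
      rw [PySem.List.pyRange_one_eq_nil (by simp)]
      simp [pvRunA]
  | cons c cs ih =>
      intro pre acc left prev hprev
      rw [PySem.List.pyRange_one_cons (by simp only [List.length_cons]; push_cast; omega)]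
      rw [List.foldl_cons]
      have harith : (pre.length : Int) + 1 = ((pre ++ [c]).length : Int) := by simp
      have harith2 : (pre.length : Int) + ((c :: cs).length : Int) = ((pre ++ [c]).length : Int) + (cs.length : Int) := by
        simp only [List.length_append, List.length_cons, List.length_nil]; push_cast; ring
      have hassoc : pre ++ c :: cs = (pre ++ [c]) ++ cs := by simp
      by_cases h0 : left = 0
      · have hstep : pvStepA (pre ++ c :: cs) (acc, left) (pre.length : Int)
            = (acc ++ [pvLetters.getD (c.toNat >>> 2) ' '], 2) := by
          simp [pvStepA, h0]
        rw [hstep, harith2, harith, hassoc, ih (pre ++ [c]) _ 2 c (fun _ => by simp)]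
        simp [pvRunA, h0]
      · have hp := hprev h0
        by_cases h6 : left = 6
        · have hstep : pvStepA (pre ++ c :: cs) (acc, left) (pre.length : Int)
              = (acc ++ [pvLetters.getD (prev.toNat &&& 63) ' ', pvLetters.getD (c.toNat >>> 2) ' '], 2) := by
            simp [pvStepA, h6, pvGetD_prev pre c prev cs hp]
          rw [hstep, harith2, harith, hassoc, ih (pre ++ [c]) _ 2 c (fun _ => by simp)]
          simp [pvRunA, h6]
        · have hstep : pvStepA (pre ++ c :: cs) (acc, left) (pre.length : Int)
              = (acc ++ [pvLetters.getD (((prev.toNat &&& (2 ^ left - 1)) <<< (6 - left)) ||| (c.toNat >>> (left + 2))) ' '], left + 2) := by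
            simp [pvStepA, h0, h6, pvGetD_prev pre c prev cs hp]
          rw [hstep, harith2, harith, hassoc, ih (pre ++ [c]) _ (left + 2) c (fun _ => by simp)]
          simp [pvRunA, h0, h6]

-- A's whole core loop plus flush equals B's grouped encoder
theorem pvCore_eq (l : List Char) :
    (let res := (PySem.List.pyRange 0 (PySem.List.len l) 1).foldl (pvStepA l) ([], 0)
     if res.2 ≠ 0 then
       res.1 ++ [pvLetters.getD (((PySem.List.pyGetD l (PySem.List.len l - 1) ' ').toNat &&& (2 ^ res.2 - 1)) <<< (6 - res.2)) ' ']
     else res.1) = pvEnc l := by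
  cases l with
  | nil =>
      rw [PySem.List.pyRange_one_eq_nil (by simp [PySem.List.len_eq])]
      simp [pvEnc]
  | cons c cs =>
      have hb := pvBridgeA (c :: cs) [] [] 0 ' ' (by intro h; exact absurd rfl h)
      simp only [List.length_nil, Int.natCast_zero, List.nil_append, zero_add] at hb
      have hrun : pvRunA (c :: cs) ' ' 0 [] = pvRunA cs c 2 [pvLetters.getD (c.toNat >>> 2) ' '] := by
        simp [pvRunA]
      have hne := pvRunA_left_ne_zero cs c 2 [pvLetters.getD (c.toNat >>> 2) ' '] (by omega)
      have hlast : PySem.List.pyGetD (c :: cs) (((c :: cs).length : Int) - 1) ' '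
          = ((c :: cs).getLast?.getD ' ') := by
        have h1 : (((c :: cs).length : Int)) - 1 = (((c :: cs).length - 1 : Nat) : Int) := by
          simp
        rw [h1, PySem.List.pyGetD_natCast, List.getLast?_eq_getElem?]
        simp [List.getD]
      simp only [PySem.List.len_eq] at hb ⊢
      rw [hb, hrun, hlast, if_pos hne]
      have hfin := pvFinish_eq_tail cs c [pvLetters.getD (c.toNat >>> 2) ' ']
      simp only [pvFinish] at hfin
      rw [hfin, pvEnc_cons]
      simp

-- the previous lemma with the let zeta-reduced, in the exact shape the unfolded port shows
theorem pvCore_eq' (l : List Char) :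
    (if ((PySem.List.pyRange 0 (PySem.List.len l) 1).foldl (pvStepA l) ([], 0)).2 ≠ 0 then
       ((PySem.List.pyRange 0 (PySem.List.len l) 1).foldl (pvStepA l) ([], 0)).1 ++
         [pvLetters.getD (((PySem.List.pyGetD l (PySem.List.len l - 1) ' ').toNat &&&
           (2 ^ ((PySem.List.pyRange 0 (PySem.List.len l) 1).foldl (pvStepA l) ([], 0)).2 - 1)) <<<
           (6 - ((PySem.List.pyRange 0 (PySem.List.len l) 1).foldl (pvStepA l) ([], 0)).2)) ' ']
     else ((PySem.List.pyRange 0 (PySem.List.len l) 1).foldl (pvStepA l) ([], 0)).1) = pvEnc l := by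
  simpa using pvCore_eq l

-- A's '=' padding loop is B's replicate
theorem pvPadEq (rv : List Char) (k : Int) :
    (PySem.List.pyRange 0 k 1).foldl (fun acc _ => acc ++ ['=']) rv
      = rv ++ List.replicate k.toNat '=' := by
  rw [PySem.List.pyRange_one, List.foldl_map,
      PySem.List.foldl_append_singleton_eq_map]
  simp [List.map_const']

theorem pvFinal (s : String) (padding : Bool) : hex_base64 s padding = hex_base64_alt s padding := by
  unfold hex_base64 hex_base64_alt
  simp only []
  rw [pvCore_eq' s.toList]
  cases padding with
  | false => rfl
  | true => simp only [pvPadEq]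

-- ===== VERDICT (by name: the statement is the Claim_ definition above) =====
theorem hex_base64_spec : Claim_equal_hex_base64 := by
  intro s padding _
  unfold Spec_hex_base64
  exact pvFinal s padding
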